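-- pv_equiv track=rewrite | github.com/Aasthaengg/IBMdataset | Python_codes/p03209/s910196539.py | count_p
-- ===== SOURCE A (Python) =====
-- def count_p(n, x):
--   if x == 0:
--     return 0
--   elif n == 0:
--     return 1
--   elif x > 2**(n+1)-2:
--     return 2**(n)-1 + 1 + count_p(n-1, min(x-(2**(n+1)-1), 2**(n+1)-3))
--   else:
--     return count_p(n-1, x-1)
-- ===== SOURCE B (Python) =====
-- def count_p(n, x):
--     # Precompute layer counts and patty counts of level-k burgers (level 0 = one patty).
--     layers = [1]
--     patties = [1]
--     for _ in range(n):
--         layers.append(2 * layers[-1] + 3)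
--         patties.append(2 * patties[-1] + 1)
--     total = 0
--     for lv in range(n, 0, -1):
--         if x == 0:
--             return total
--         if x > layers[lv - 1] + 1:
--             total += patties[lv - 1] + 1
--             x = min(x - (layers[lv - 1] + 2), layers[lv - 1])
--         else:
--             x -= 1
--     return total if x == 0 else total + 1
-- ===== Notes on version B (the rewrite author's own statement) =====
-- stated objective: alternative
-- what changed: Replaced the self-referential recursion that recomputes 2**(n+1) powers at each level by a two-stage iterative algorithm: first build layer-count and patty-count tables by a simple doubling recurrence, then consume x in a single descending for-loop over levels with an accumulator, looking the sizes up in the tables.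
import Mathlib
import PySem

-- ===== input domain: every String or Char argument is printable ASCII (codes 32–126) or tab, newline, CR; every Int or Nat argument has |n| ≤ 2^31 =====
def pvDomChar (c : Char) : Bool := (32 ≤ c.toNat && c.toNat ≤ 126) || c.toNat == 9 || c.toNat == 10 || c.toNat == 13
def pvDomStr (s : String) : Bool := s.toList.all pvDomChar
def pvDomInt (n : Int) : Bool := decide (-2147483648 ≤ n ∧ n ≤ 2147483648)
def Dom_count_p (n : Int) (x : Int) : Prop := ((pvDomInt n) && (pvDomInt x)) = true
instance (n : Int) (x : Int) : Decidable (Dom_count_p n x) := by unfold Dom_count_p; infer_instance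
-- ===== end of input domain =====

-- B replaces A's recursion by precomputed size/patty tables plus one descending loop with an accumulator (alternative decomposition, same cost).
-- ===== PORT A =====
-- Python's `n == 0` base case is guarded as `n <= 0` for termination; for n < 0 with x != 0
-- the Python A leaves the integers (2**(n+1) is a float), and Pre_ excludes exactly those inputs.
def count_p (n : Int) (x : Int) : Int :=
  if x = 0 then 0
  else if n ≤ 0 then 1
  else if x > 2 ^ (n + 1).toNat - 2 then
    2 ^ n.toNat - 1 + 1 + count_p (n - 1) (min (x - (2 ^ (n + 1).toNat - 1)) (2 ^ (n + 1).toNat - 3))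
  else count_p (n - 1) (x - 1)
termination_by n.toNat
decreasing_by all_goals omega

-- ===== PORT B =====
-- the table-building `for _ in range(n)` loop of Source B: appends 2*last+3 / 2*last+1
def count_p_tables : Nat → List Int × List Int
  | 0 => ([1], [1])
  | k + 1 =>
    let t := count_p_tables k
    (t.1 ++ [2 * PySem.List.pyGetD t.1 (-1) 0 + 3],
     t.2 ++ [2 * PySem.List.pyGetD t.2 (-1) 0 + 1])

-- the `for lv in range(n, 0, -1)` loop of Source B with its early returns; the [] case is the
-- code after the loop. Table indices lv-1 are always in range, so pyGetD's default is never read.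
def count_p_go (layers patties : List Int) : List Int → Int → Int → Int
  | [], x, total => if x = 0 then total else total + 1
  | lv :: rest, x, total =>
    if x = 0 then total
    else if x > PySem.List.pyGetD layers (lv - 1) 0 + 1 then
      count_p_go layers patties rest
        (min (x - (PySem.List.pyGetD layers (lv - 1) 0 + 2)) (PySem.List.pyGetD layers (lv - 1) 0))
        (total + (PySem.List.pyGetD patties (lv - 1) 0 + 1))
    else count_p_go layers patties rest (x - 1) total

def count_p_alt (n : Int) (x : Int) : Int :=
  let t := count_p_tables n.toNat
  count_p_go t.1 t.2 (PySem.List.pyRange n 0 (-1)) x 0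

-- ===== PRECONDITION & SPEC =====
-- Pre_ excludes n < 0 with x ≠ 0: there the Python A computes 2**(n+1) as a float and
-- returns a float (or recurses forever), never an int.
def Pre_count_p (n : Int) (x : Int) : Prop := 0 ≤ n ∨ x = 0
instance (n : Int) (x : Int) : Decidable (Pre_count_p n x) := by unfold Pre_count_p; infer_instance
def pvWitness_count_p : Int × Int := (3, 10)
def Spec_count_p (n : Int) (x : Int) (out : Int) : Prop := out = count_p_alt n x
instance (n : Int) (x : Int) (out : Int) : Decidable (Spec_count_p n x out) := by unfold Spec_count_p; infer_instance

-- ===== CLAIM (what is proved, stated in full; the proofs are below) =====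
def Claim_equal_count_p : Prop := ∀ (n : Int) (x : Int), Dom_count_p n x → Pre_count_p n x → Spec_count_p n x (count_p n x)

-- ===== LEMMAS AND PROOFS =====
-- closed form of the tables: layers[i] = 2^(i+2)-3, patties[i] = 2^(i+1)-1
theorem count_p_tables_eq (k : Nat) :
    count_p_tables k = ((List.range (k+1)).map (fun i => (2:Int) ^ (i+2) - 3),
                        (List.range (k+1)).map (fun i => (2:Int) ^ (i+1) - 1)) := by
  induction k with
  | zero => rfl
  | succ k ih =>
      rw [count_p_tables, ih]
      simp [List.range_succ, PySem.List.pyGetD_neg_one_append_singleton]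
      constructor <;> ring

-- the descending loop, run from level n with valid tables, adds count_p n x to the accumulator
theorem count_p_go_eq (N : Nat) (n x total : Int) (h0 : 0 ≤ n) (hN : n ≤ (N : Int)) :
    count_p_go ((List.range (N+1)).map (fun i => (2:Int) ^ (i+2) - 3))
               ((List.range (N+1)).map (fun i => (2:Int) ^ (i+1) - 1))
               (PySem.List.pyRange n 0 (-1)) x total
      = total + count_p n x := by
  obtain ⟨m, rfl⟩ : ∃ m : Nat, n = (m : Int) := ⟨n.toNat, by omega⟩
  induction m generalizing x total with
  | zero =>
      rw [PySem.List.pyRange_neg_one_eq_nil (by omega), count_p_go, count_p]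
      split_ifs <;> simp_all
  | succ m ih =>
      have hm : ((m : Int) + 1) - 1 = ((m : Int)) := by ring
      rw [show ((m+1 : Nat) : Int) = (m : Int) + 1 by push_cast; ring] at *
      rw [PySem.List.pyRange_neg_one_cons (by omega), count_p_go]
      have hlook1 : PySem.List.pyGetD ((List.range (N+1)).map (fun i => (2:Int) ^ (i+2) - 3)) (((m:Int) + 1) - 1) 0 = (2:Int) ^ (m+2) - 3 := by
        rw [hm, PySem.List.pyGetD_natCast, PySem.List.getD_map_range _ _ _ _ (by omega)]
      have hlook2 : PySem.List.pyGetD ((List.range (N+1)).map (fun i => (2:Int) ^ (i+1) - 1)) (((m:Int) + 1) - 1) 0 = (2:Int) ^ (m+1) - 1 := by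
        rw [hm, PySem.List.pyGetD_natCast, PySem.List.getD_map_range _ _ _ _ (by omega)]
      rw [hlook1, hlook2]
      rw [count_p]
      have hxeq : ((m : Int) + 1 + 1).toNat = m + 2 := by omega
      have hneq : ((m : Int) + 1).toNat = m + 1 := by omega
      rw [hxeq, hneq, hm]
      have e1 : ((2:Int) ^ (m+2) - 3 + 1) = 2 ^ (m+2) - 2 := by ring
      have e2 : ((2:Int) ^ (m+2) - 3 + 2) = 2 ^ (m+2) - 1 := by ring
      rw [e1, e2]
      by_cases hx : x = 0
      · simp [hx]
      · simp only [if_neg hx, if_neg (by omega : ¬ ((m : Int) + 1) ≤ 0)]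
        by_cases hgt : x > (2:Int) ^ (m + 2) - 2
        · simp only [if_pos hgt]
          rw [ih _ _ (by omega) (by omega)]
          ring
        · simp only [if_neg hgt]
          rw [ih _ _ (by omega) (by omega)]

-- ===== VERDICT (by name: the statement is the Claim_ definition above) =====
theorem count_p_spec : Claim_equal_count_p := by
  intro n x _ hpre
  unfold Spec_count_p count_p_alt
  rw [count_p_tables_eq]
  by_cases hn : 0 ≤ n
  · rw [count_p_go_eq n.toNat n x 0 hn (by omega)]; ring
  · have hx : x = 0 := hpre.resolve_left hn
    rw [PySem.List.pyRange_neg_one_eq_nil (by omega), count_p_go, count_p]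
    simp [hx]
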